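-- pv_equiv track=rewrite | github.com/ChrisGVE/workspace-qdrant-mcp | 20250920-2211_cli_utility_gap_analysis.py | _determine_consolidation_target
-- ===== SOURCE A (Python) =====
-- from typing import Dict, List, Set, Tuple
--
-- def _determine_consolidation_target(functionality: List[str]) -> str:
--     """Determine which wqm subcommand this should consolidate to"""
--     if any(f in functionality for f in ['daemon_control', 'service']):
--         return "wqm_service"
--     elif any(f in functionality for f in ['collection_management', 'administration']):
--         return "wqm_admin"
--     elif any(f in functionality for f in ['configuration']):
--         return "wqm_config"
--     elif any(f in functionality for f in ['document_processing', 'ingest']):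
--         return "wqm_ingest"
--     elif any(f in functionality for f in ['monitoring', 'status_reporting']):
--         return "wqm_status"
--     else:
--         return "wqm_utility"
-- ===== SOURCE B (Python) =====
-- def _determine_consolidation_target(functionality):
--     """Determine which wqm subcommand this should consolidate to"""
--     priority = {
--         'daemon_control': (0, 'wqm_service'),
--         'service': (0, 'wqm_service'),
--         'collection_management': (1, 'wqm_admin'),
--         'administration': (1, 'wqm_admin'),
--         'configuration': (2, 'wqm_config'),
--         'document_processing': (3, 'wqm_ingest'),
--         'ingest': (3, 'wqm_ingest'),
--         'monitoring': (4, 'wqm_status'),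
--         'status_reporting': (4, 'wqm_status'),
--     }
--     best = (5, 'wqm_utility')
--     for f in functionality:
--         cand = priority.get(f)
--         if cand is not None and cand[0] < best[0]:
--             best = cand
--     return best[1]
-- ===== Notes on version B (the rewrite author's own statement) =====
-- stated objective: alternative
-- what changed: Instead of A's five-branch cascade that rescans the input list once per keyword, B makes a single pass over the input, ranking each element through a keyword->(priority,target) dict and keeping the lowest-priority match as an accumulator, returning its target.
import Mathlib
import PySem

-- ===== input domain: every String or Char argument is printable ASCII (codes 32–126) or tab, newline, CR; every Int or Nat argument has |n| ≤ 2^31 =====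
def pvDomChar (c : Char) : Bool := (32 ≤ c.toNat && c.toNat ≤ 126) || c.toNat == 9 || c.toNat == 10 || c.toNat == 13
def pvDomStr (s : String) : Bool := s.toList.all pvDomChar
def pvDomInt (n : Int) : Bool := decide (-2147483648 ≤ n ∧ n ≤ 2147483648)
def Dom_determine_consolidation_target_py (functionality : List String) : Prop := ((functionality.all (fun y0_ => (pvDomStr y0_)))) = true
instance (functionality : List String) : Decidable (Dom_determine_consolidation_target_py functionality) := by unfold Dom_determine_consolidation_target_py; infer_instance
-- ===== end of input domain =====

-- B replaces A's five-branch cascade (which rescans the input once per keyword) by a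
-- single pass over the input keeping the lowest-priority dict match (objective: alternative).

-- ===== PORT A =====
-- A: if any(f in functionality for f in [...]): return ... (elif cascade, else fallback)
def determine_consolidation_target_py (functionality : List String) : String :=
  if (["daemon_control", "service"].any (fun f => functionality.contains f)) then
    "wqm_service"
  else if (["collection_management", "administration"].any (fun f => functionality.contains f)) then
    "wqm_admin"
  else if (["configuration"].any (fun f => functionality.contains f)) then
    "wqm_config"
  else if (["document_processing", "ingest"].any (fun f => functionality.contains f)) then
    "wqm_ingest"
  else if (["monitoring", "status_reporting"].any (fun f => functionality.contains f)) then
    "wqm_status"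
  else
    "wqm_utility"

-- ===== PORT B =====
-- B's keyword -> (priority, target) dict literal
def pvPriority : PySem.Dict String (Int × String) :=
  PySem.Dict.mk
    [ ("daemon_control", (0, "wqm_service")),
      ("service", (0, "wqm_service")),
      ("collection_management", (1, "wqm_admin")),
      ("administration", (1, "wqm_admin")),
      ("configuration", (2, "wqm_config")),
      ("document_processing", (3, "wqm_ingest")),
      ("ingest", (3, "wqm_ingest")),
      ("monitoring", (4, "wqm_status")),
      ("status_reporting", (4, "wqm_status")) ]

-- the 'for f in functionality: cand = priority.get(f); if cand is not None and cand[0] < best[0]: best = cand' loop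
def pvLoop (best : Int × String) : List String → Int × String
  | [] => best
  | f :: rest =>
      match pvPriority.get? f with
      | some cand => pvLoop (if cand.1 < best.1 then cand else best) rest
      | none => pvLoop best rest

def determine_consolidation_target_py_alt (functionality : List String) : String :=
  (pvLoop (5, "wqm_utility") functionality).2

-- ===== PRECONDITION & SPEC =====
def Spec_determine_consolidation_target_py (functionality : List String) (out : String) : Prop := out = determine_consolidation_target_py_alt functionality
instance (functionality : List String) (out : String) : Decidable (Spec_determine_consolidation_target_py functionality out) := by unfold Spec_determine_consolidation_target_py; infer_instance

-- ===== CLAIM (what is proved, stated in full; the proofs are below) =====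
def Claim_equal_determine_consolidation_target_py : Prop := ∀ (functionality : List String), Dom_determine_consolidation_target_py functionality → Spec_determine_consolidation_target_py functionality (determine_consolidation_target_py functionality)

-- ===== LEMMAS AND PROOFS =====

-- canonical target for a priority rank
def pvP (k : Int) : String :=
  if k = 0 then "wqm_service" else if k = 1 then "wqm_admin" else if k = 2 then "wqm_config"
  else if k = 3 then "wqm_ingest" else if k = 4 then "wqm_status" else "wqm_utility"

-- rank of a string (5 = not a keyword)
def pvRk (f : String) : Int := ((pvPriority.get? f).map Prod.fst).getD 5

-- minimum rank occurring in the list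
def pvM (xs : List String) : Int := xs.foldr (fun f m => min (pvRk f) m) 5

theorem pv_get_shape (f : String) (p : Int × String) (h : pvPriority.get? f = some p) :
    0 ≤ p.1 ∧ p.1 < 5 ∧ p.2 = pvP p.1 := by
  unfold pvPriority at h
  simp only [PySem.Dict.get?_mk_cons, beq_iff_eq] at h
  split_ifs at h <;> first | (cases h; decide) | simp [PySem.Dict.get?] at h

theorem pv_rk_bounds (f : String) : 0 ≤ pvRk f ∧ pvRk f ≤ 5 := by
  unfold pvRk
  cases h : pvPriority.get? f with
  | none => simp
  | some p => have := pv_get_shape f p h; simp; omega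

theorem pv_rk_of_get (f : String) (p : Int × String) (h : pvPriority.get? f = some p) :
    pvRk f = p.1 := by unfold pvRk; simp [h]

theorem pv_rk_of_none (f : String) (h : pvPriority.get? f = none) : pvRk f = 5 := by
  unfold pvRk; simp [h]

theorem pv_M_bounds (xs : List String) : 0 ≤ pvM xs ∧ pvM xs ≤ 5 := by
  induction xs with
  | nil => simp [pvM]
  | cons f rest ih =>
      have := pv_rk_bounds f
      simp only [pvM, List.foldr] at ih ⊢
      omega

theorem pv_loop_char (xs : List String) (k : Int) (hk0 : 0 ≤ k) (hk5 : k ≤ 5) :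
    pvLoop (k, pvP k) xs = (min k (pvM xs), pvP (min k (pvM xs))) := by
  induction xs generalizing k with
  | nil =>
      simp only [pvLoop, pvM, List.foldr]
      have : min k 5 = k := by omega
      rw [this]
  | cons f rest ih =>
      have hM := pv_M_bounds rest
      cases h : pvPriority.get? f with
      | none =>
          have hr := pv_rk_of_none f h
          simp only [pvLoop, h]
          rw [ih k hk0 hk5]
          have : min k (pvM (f :: rest)) = min k (pvM rest) := by
            simp only [pvM, List.foldr] at *; omega
          rw [this]
      | some p =>
          obtain ⟨hp0, hp5, hps⟩ := pv_get_shape f p h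
          have hr := pv_rk_of_get f p h
          have hpeq : p = (p.1, pvP p.1) := by
            cases p; simp_all
          simp only [pvLoop, h]
          by_cases hlt : p.1 < k
          · rw [if_pos hlt, hpeq, ih p.1 hp0 (by omega)]
            have : min p.1 (pvM rest) = min k (pvM (f :: rest)) := by
              simp only [pvM, List.foldr] at *; omega
            rw [this]
          · rw [if_neg hlt, ih k hk0 hk5]
            have : min k (pvM rest) = min k (pvM (f :: rest)) := by
              simp only [pvM, List.foldr] at *; omega
            rw [this]

theorem pv_M_le_iff (xs : List String) (k : Int) (hk : k < 5) :
    pvM xs ≤ k ↔ ∃ f ∈ xs, pvRk f ≤ k := by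
  induction xs with
  | nil => simp [pvM]; omega
  | cons f rest ih =>
      simp only [pvM, List.foldr] at ih ⊢
      constructor
      · intro h
        by_cases h' : pvRk f ≤ k
        · exact ⟨f, by simp, h'⟩
        · have : pvM rest ≤ k := by simp only [pvM]; omega
          obtain ⟨g, hg, hgk⟩ := ih.mp this
          exact ⟨g, by simp [hg], hgk⟩
      · rintro ⟨g, hg, hgk⟩
        rcases List.mem_cons.mp hg with rfl | hg'
        · omega
        · have := ih.mpr ⟨g, hg', hgk⟩; omega

-- rank characterizations: pvRk f = j ↔ f is one of group j's keywords
theorem pv_rk0 (f : String) : pvRk f = 0 ↔ (f = "daemon_control" ∨ f = "service") := by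
  unfold pvRk pvPriority
  simp only [PySem.Dict.get?_mk_cons, beq_iff_eq]
  split_ifs <;> (try subst_vars) <;> simp_all [PySem.Dict.get?, eq_comm]

theorem pv_rk1 (f : String) : pvRk f = 1 ↔ (f = "collection_management" ∨ f = "administration") := by
  unfold pvRk pvPriority
  simp only [PySem.Dict.get?_mk_cons, beq_iff_eq]
  split_ifs <;> (try subst_vars) <;> simp_all [PySem.Dict.get?, eq_comm]

theorem pv_rk2 (f : String) : pvRk f = 2 ↔ f = "configuration" := by
  unfold pvRk pvPriority
  simp only [PySem.Dict.get?_mk_cons, beq_iff_eq]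
  split_ifs <;> (try subst_vars) <;> simp_all [PySem.Dict.get?, eq_comm]

theorem pv_rk3 (f : String) : pvRk f = 3 ↔ (f = "document_processing" ∨ f = "ingest") := by
  unfold pvRk pvPriority
  simp only [PySem.Dict.get?_mk_cons, beq_iff_eq]
  split_ifs <;> (try subst_vars) <;> simp_all [PySem.Dict.get?, eq_comm]

theorem pv_rk4 (f : String) : pvRk f = 4 ↔ (f = "monitoring" ∨ f = "status_reporting") := by
  unfold pvRk pvPriority
  simp only [PySem.Dict.get?_mk_cons, beq_iff_eq]
  split_ifs <;> (try subst_vars) <;> simp_all [PySem.Dict.get?, eq_comm]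

-- A's cascade equals pvP (pvM xs)
theorem pv_A_char (xs : List String) : determine_consolidation_target_py xs = pvP (pvM xs) := by
  have hb := pv_M_bounds xs
  have h0 : (∃ f ∈ xs, pvRk f = 0) ↔ (xs.contains "daemon_control" = true ∨ xs.contains "service" = true) := by
    simp only [List.contains_iff_mem]
    constructor
    · rintro ⟨f, hf, hr⟩; rcases (pv_rk0 f).mp hr with rfl | rfl
      · exact Or.inl hf
      · exact Or.inr hf
    · rintro (h | h) <;> exact ⟨_, h, (pv_rk0 _).mpr (by simp)⟩
  have h1 : (∃ f ∈ xs, pvRk f = 1) ↔ (xs.contains "collection_management" = true ∨ xs.contains "administration" = true) := by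
    simp only [List.contains_iff_mem]
    constructor
    · rintro ⟨f, hf, hr⟩; rcases (pv_rk1 f).mp hr with rfl | rfl
      · exact Or.inl hf
      · exact Or.inr hf
    · rintro (h | h) <;> exact ⟨_, h, (pv_rk1 _).mpr (by simp)⟩
  have h2 : (∃ f ∈ xs, pvRk f = 2) ↔ (xs.contains "configuration" = true) := by
    simp only [List.contains_iff_mem]
    constructor
    · rintro ⟨f, hf, hr⟩; rcases (pv_rk2 f).mp hr with rfl; exact hf
    · intro h; exact ⟨_, h, (pv_rk2 _).mpr rfl⟩
  have h3 : (∃ f ∈ xs, pvRk f = 3) ↔ (xs.contains "document_processing" = true ∨ xs.contains "ingest" = true) := by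
    simp only [List.contains_iff_mem]
    constructor
    · rintro ⟨f, hf, hr⟩; rcases (pv_rk3 f).mp hr with rfl | rfl
      · exact Or.inl hf
      · exact Or.inr hf
    · rintro (h | h) <;> exact ⟨_, h, (pv_rk3 _).mpr (by simp)⟩
  have h4 : (∃ f ∈ xs, pvRk f = 4) ↔ (xs.contains "monitoring" = true ∨ xs.contains "status_reporting" = true) := by
    simp only [List.contains_iff_mem]
    constructor
    · rintro ⟨f, hf, hr⟩; rcases (pv_rk4 f).mp hr with rfl | rfl
      · exact Or.inl hf
      · exact Or.inr hf
    · rintro (h | h) <;> exact ⟨_, h, (pv_rk4 _).mpr (by simp)⟩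
  have key : ∀ j : Int, 0 ≤ j → j < 5 →
      (pvM xs ≤ j ↔ ∃ i : Int, 0 ≤ i ∧ i ≤ j ∧ ∃ f ∈ xs, pvRk f = i) := by
    intro j hj0 hj5
    rw [pv_M_le_iff xs j hj5]
    constructor
    · rintro ⟨f, hf, hfk⟩
      have := (pv_rk_bounds f).1
      exact ⟨pvRk f, this, hfk, f, hf, rfl⟩
    · rintro ⟨i, _, hij, f, hf, hr⟩
      exact ⟨f, hf, by omega⟩
  unfold determine_consolidation_target_py
  by_cases c0 : (xs.contains "daemon_control" = true ∨ xs.contains "service" = true)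
  · have hM : pvM xs ≤ 0 := (key 0 (by norm_num) (by norm_num)).mpr ⟨0, by omega, by omega, h0.mpr c0⟩
    have hMeq : pvM xs = 0 := by omega
    rw [hMeq]
    have hc : (["daemon_control", "service"].any (fun f => xs.contains f)) = true := by
      simp only [List.any_cons, List.any_nil, Bool.or_false, Bool.or_eq_true]
      exact c0
    rw [if_pos hc]; rfl
  · have nc0 : ¬ ∃ f ∈ xs, pvRk f = 0 := fun h => c0 (h0.mp h)
    have hb0 : ¬ ((["daemon_control", "service"].any (fun f => xs.contains f)) = true) := by
      simp only [List.any_cons, List.any_nil, Bool.or_false, Bool.or_eq_true]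
      exact c0
    rw [if_neg hb0]
    by_cases c1 : (xs.contains "collection_management" = true ∨ xs.contains "administration" = true)
    · have hM : pvM xs ≤ 1 := (key 1 (by norm_num) (by norm_num)).mpr ⟨1, by omega, by omega, h1.mpr c1⟩
      have hMlo : ¬ pvM xs ≤ 0 := by
        intro h
        obtain ⟨i, hi0, hi1, hex⟩ := (key 0 (by norm_num) (by norm_num)).mp h
        interval_cases i
        · exact nc0 hex
      have hMeq : pvM xs = 1 := by omega
      rw [hMeq]
      have hc : (["collection_management", "administration"].any (fun f => xs.contains f)) = true := by
        simp only [List.any_cons, List.any_nil, Bool.or_false, Bool.or_eq_true]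
        exact c1
      rw [if_pos hc]; rfl
    · have nc1 : ¬ ∃ f ∈ xs, pvRk f = 1 := fun h => c1 (h1.mp h)
      have hb1 : ¬ ((["collection_management", "administration"].any (fun f => xs.contains f)) = true) := by
        simp only [List.any_cons, List.any_nil, Bool.or_false, Bool.or_eq_true]
        exact c1
      rw [if_neg hb1]
      by_cases c2 : (xs.contains "configuration" = true)
      · have hM : pvM xs ≤ 2 := (key 2 (by norm_num) (by norm_num)).mpr ⟨2, by omega, by omega, h2.mpr c2⟩
        have hMlo : ¬ pvM xs ≤ 1 := by
          intro h
          obtain ⟨i, hi0, hi1, hex⟩ := (key 1 (by norm_num) (by norm_num)).mp h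
          interval_cases i
          · exact nc0 hex
          · exact nc1 hex
        have hMeq : pvM xs = 2 := by omega
        rw [hMeq]
        have hc : (["configuration"].any (fun f => xs.contains f)) = true := by
          simp only [List.any_cons, List.any_nil, Bool.or_false]
          exact c2
        rw [if_pos hc]; rfl
      · have nc2 : ¬ ∃ f ∈ xs, pvRk f = 2 := fun h => c2 (h2.mp h)
        have hb2 : ¬ ((["configuration"].any (fun f => xs.contains f)) = true) := by
          simp only [List.any_cons, List.any_nil, Bool.or_false]
          exact c2
        rw [if_neg hb2]
        by_cases c3 : (xs.contains "document_processing" = true ∨ xs.contains "ingest" = true)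
        · have hM : pvM xs ≤ 3 := (key 3 (by norm_num) (by norm_num)).mpr ⟨3, by omega, by omega, h3.mpr c3⟩
          have hMlo : ¬ pvM xs ≤ 2 := by
            intro h
            obtain ⟨i, hi0, hi1, hex⟩ := (key 2 (by norm_num) (by norm_num)).mp h
            interval_cases i
            · exact nc0 hex
            · exact nc1 hex
            · exact nc2 hex
          have hMeq : pvM xs = 3 := by omega
          rw [hMeq]
          have hc : (["document_processing", "ingest"].any (fun f => xs.contains f)) = true := by
            simp only [List.any_cons, List.any_nil, Bool.or_false, Bool.or_eq_true]
            exact c3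
          rw [if_pos hc]; rfl
        · have nc3 : ¬ ∃ f ∈ xs, pvRk f = 3 := fun h => c3 (h3.mp h)
          have hb3 : ¬ ((["document_processing", "ingest"].any (fun f => xs.contains f)) = true) := by
            simp only [List.any_cons, List.any_nil, Bool.or_false, Bool.or_eq_true]
            exact c3
          rw [if_neg hb3]
          by_cases c4 : (xs.contains "monitoring" = true ∨ xs.contains "status_reporting" = true)
          · have hM : pvM xs ≤ 4 := (key 4 (by norm_num) (by norm_num)).mpr ⟨4, by omega, by omega, h4.mpr c4⟩
            have hMlo : ¬ pvM xs ≤ 3 := by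
              intro h
              obtain ⟨i, hi0, hi1, hex⟩ := (key 3 (by norm_num) (by norm_num)).mp h
              interval_cases i
              · exact nc0 hex
              · exact nc1 hex
              · exact nc2 hex
              · exact nc3 hex
            have hMeq : pvM xs = 4 := by omega
            rw [hMeq]
            have hc : (["monitoring", "status_reporting"].any (fun f => xs.contains f)) = true := by
              simp only [List.any_cons, List.any_nil, Bool.or_false, Bool.or_eq_true]
              exact c4
            rw [if_pos hc]; rfl
          · have nc4 : ¬ ∃ f ∈ xs, pvRk f = 4 := fun h => c4 (h4.mp h)
            have hb4 : ¬ ((["monitoring", "status_reporting"].any (fun f => xs.contains f)) = true) := by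
              simp only [List.any_cons, List.any_nil, Bool.or_false, Bool.or_eq_true]
              exact c4
            rw [if_neg hb4]
            have hM4 : ¬ pvM xs ≤ 4 := by
              intro h
              obtain ⟨i, hi0, hi1, hex⟩ := (key 4 (by norm_num) (by norm_num)).mp h
              interval_cases i
              · exact nc0 hex
              · exact nc1 hex
              · exact nc2 hex
              · exact nc3 hex
              · exact nc4 hex
            have hMeq : pvM xs = 5 := by omega
            rw [hMeq]; rfl


-- B equals pvP (pvM xs)
theorem pv_B_char (xs : List String) : determine_consolidation_target_py_alt xs = pvP (pvM xs) := by
  unfold determine_consolidation_target_py_alt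
  have h := pv_loop_char xs 5 (by norm_num) le_rfl
  have h5 : pvP 5 = "wqm_utility" := rfl
  rw [h5] at h
  rw [h]
  have hb := pv_M_bounds xs
  have hmin : min 5 (pvM xs) = pvM xs := by omega
  rw [hmin]

-- ===== VERDICT (by name: the statement is the Claim_ definition above) =====
theorem determine_consolidation_target_py_spec : Claim_equal_determine_consolidation_target_py := by
  intro xs _
  unfold Spec_determine_consolidation_target_py
  rw [pv_A_char, pv_B_char]
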